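-- pv_equiv track=rewrite | github.com/saraivaufc/dojos | Seções/Seção 6-10_06_2016/arca.py | arca
-- ===== SOURCE A (Python) =====
-- def e_par (animal1,animal2):
-- 	"""
-- 	>>> e_par(3,-3)
-- 	True
-- 	>>> e_par(1,2)
-- 	False
-- 	"""
-- 	n = animal1
-- 	n1 = animal2
-- 	if animal1 == (animal2*(-1)):
-- 		return True
-- 	else:
-- 		return False
--
-- def tem_par (animal,animais):
-- 	"""
-- 	>>> tem_par (1,[0,2,5,-1])
-- 	True
-- 	>>> tem_par (3,[1,-2,5,8])
-- 	False
-- 	"""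
-- 	n = animal
--
-- 	for i in animais:
-- 		if e_par (n,i):
-- 			return True
-- 	return False
--
-- def arca (animais):
-- 	"""
-- 	>>> arca( [0,1,-1,2,3,5,-6])
-- 	1
-- 	"""
-- 	cont = 1
-- 	pares = 0
-- 	for i in animais:
-- 		subvetor = animais[cont:]
-- 		#print i, subvetor
-- 		if tem_par (i,subvetor):
-- 			pares = pares + 1
-- 		cont = cont + 1
-- 	return pares
-- ===== SOURCE B (Python) =====
-- def arca(animais):
--     seen = set()
--     pares = 0
--     for x in reversed(animais):
--         if -x in seen:
--             pares += 1
--         seen.add(x)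
--     return pares
-- ===== Notes on version B (the rewrite author's own statement) =====
-- stated objective: faster
-- what changed: Replaced the per-element slice-and-scan (tem_par over animais[cont:]) by a single right-to-left pass that keeps the suffix values in a hash set and tests -x in it.
import Mathlib
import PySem

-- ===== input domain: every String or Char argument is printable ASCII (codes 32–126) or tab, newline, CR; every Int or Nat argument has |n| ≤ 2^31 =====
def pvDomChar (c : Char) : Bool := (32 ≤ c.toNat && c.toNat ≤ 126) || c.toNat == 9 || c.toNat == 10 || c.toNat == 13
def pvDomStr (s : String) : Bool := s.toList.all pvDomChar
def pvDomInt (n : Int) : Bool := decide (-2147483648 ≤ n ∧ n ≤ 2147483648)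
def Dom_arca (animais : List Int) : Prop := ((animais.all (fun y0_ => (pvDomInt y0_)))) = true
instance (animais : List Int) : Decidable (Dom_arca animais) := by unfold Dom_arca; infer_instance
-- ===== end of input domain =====

-- B replaces A's quadratic slice-and-scan by one right-to-left pass with a set of suffix values (asymptotically faster).

-- ===== PORT A =====
def e_par (animal1 animal2 : Int) : Bool :=
  if animal1 == animal2 * (-1) then true else false

def tem_par (animal : Int) (animais : List Int) : Bool :=
  animais.any (fun i => e_par animal i)

def arca (animais : List Int) : Int :=
  (animais.foldl (fun (st : Int × Int) i =>
      let subvetor := PySem.List.slice animais (some st.1) none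
      let pares := if tem_par i subvetor then st.2 + 1 else st.2
      (st.1 + 1, pares)) (1, 0)).2

-- ===== PORT B =====
def arca_alt (animais : List Int) : Int :=
  (animais.reverse.foldl (fun (st : PySem.Set Int × Int) x =>
      (PySem.Set.add st.1 x, if PySem.Set.contains st.1 (-x) then st.2 + 1 else st.2))
    (PySem.Set.empty, 0)).2

-- ===== PRECONDITION & SPEC =====
def Spec_arca (animais : List Int) (out : Int) : Prop := out = arca_alt animais
instance (animais : List Int) (out : Int) : Decidable (Spec_arca animais out) := by unfold Spec_arca; infer_instance

-- ===== CLAIM (what is proved, stated in full; the proofs are below) =====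
def Claim_equal_arca : Prop := ∀ (animais : List Int), Dom_arca animais → Spec_arca animais (arca animais)

-- ===== LEMMAS AND PROOFS =====

-- reference count: number of elements whose negation occurs strictly later
def pvF : List Int → Int
  | [] => 0
  | x :: r => (if -x ∈ r then 1 else 0) + pvF r

lemma tem_par_iff (x : Int) (l : List Int) : tem_par x l = true ↔ -x ∈ l := by
  simp [tem_par, e_par, List.any_eq_true]
  constructor
  · rintro ⟨j, hj, rfl⟩; simpa using hj
  · intro h; exact ⟨-x, h, by ring⟩

lemma arca_aux (animais : List Int) : ∀ (l pre : List Int) (p : Int),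
    animais = pre ++ l →
    (l.foldl (fun (st : Int × Int) i =>
      let subvetor := PySem.List.slice animais (some st.1) none
      let pares := if tem_par i subvetor then st.2 + 1 else st.2
      (st.1 + 1, pares)) ((pre.length : Int) + 1, p)).2 = p + pvF l := by
  intro l
  induction l with
  | nil => intro pre p h; simp [pvF]
  | cons x r ih =>
    intro pre p h
    have hslice : PySem.List.slice animais (some ((pre.length : Int) + 1)) none = r := by
      have : ((pre.length : Int) + 1) = ((pre.length + 1 : Nat) : Int) := by push_cast; ring
      rw [this, PySem.List.slice_from_natCast, h]
      have : pre ++ x :: r = (pre ++ [x]) ++ r := by simp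
      rw [this]
      have hlen : pre.length + 1 = (pre ++ [x]).length := by simp
      rw [hlen, List.drop_left]
    simp only [List.foldl_cons, hslice]
    have hcast : ((pre.length : Int) + 1 + 1) = (((pre ++ [x]).length : Nat) : Int) + 1 := by
      push_cast [List.length_append, List.length_singleton]; ring
    by_cases hm : -x ∈ r
    · rw [if_pos ((tem_par_iff x r).2 hm)]
      rw [hcast, ih (pre ++ [x]) (p + 1) (by simp [h])]
      simp only [pvF]; rw [if_pos hm]; ring
    · rw [if_neg (by simp [tem_par_iff, hm])]
      rw [hcast, ih (pre ++ [x]) p (by simp [h])]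
      simp only [pvF]; rw [if_neg hm]; ring

-- reference count for B: negation occurs later in l or is in the seed set s
def pvG : List Int → PySem.Set Int → Int
  | [], _ => 0
  | x :: r, s => pvG r s + (if -x ∈ r ∨ -x ∈ s then 1 else 0)

lemma fold_fst (m : List Int) : ∀ (s : PySem.Set Int) (p : Int),
    (m.foldl (fun (st : PySem.Set Int × Int) x =>
      (PySem.Set.add st.1 x, if PySem.Set.contains st.1 (-x) then st.2 + 1 else st.2)) (s, p)).1
    = PySem.Set.update s m := by
  induction m with
  | nil => intro s p; simp [PySem.Set.update]
  | cons x r ih =>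
    intro s p
    simp only [List.foldl_cons]
    rw [ih]
    simp [PySem.Set.update]

lemma arca_alt_aux (l : List Int) : ∀ (s : PySem.Set Int) (p : Int),
    (l.reverse.foldl (fun (st : PySem.Set Int × Int) x =>
      (PySem.Set.add st.1 x, if PySem.Set.contains st.1 (-x) then st.2 + 1 else st.2)) (s, p)).2
    = p + pvG l s := by
  induction l with
  | nil => intro s p; simp [pvG]
  | cons x r ih =>
    intro s p
    have : (x :: r).reverse = r.reverse ++ [x] := by simp
    rw [this, List.foldl_append]
    have hfold : (r.reverse.foldl (fun (st : PySem.Set Int × Int) x =>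
        (PySem.Set.add st.1 x, if PySem.Set.contains st.1 (-x) then st.2 + 1 else st.2)) (s, p))
        = (PySem.Set.update s r.reverse, p + pvG r s) := by
      have h1 := fold_fst r.reverse s p
      have h2 := ih s p
      exact Prod.ext h1 h2
    rw [hfold]
    simp only [List.foldl_cons, List.foldl_nil]
    have hc : PySem.Set.contains (PySem.Set.update s r.reverse) (-x) = true ↔
        (-x ∈ r ∨ -x ∈ s) := by
      rw [PySem.Set.contains_iff, PySem.Set.mem_update]
      simp [or_comm]
    by_cases hm : -x ∈ r ∨ -x ∈ s
    · rw [if_pos (hc.2 hm)]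
      simp only [pvG]; rw [if_pos hm]; ring
    · rw [if_neg (fun h => hm (hc.1 h))]
      simp only [pvG]; rw [if_neg hm]; ring

lemma pvG_empty (l : List Int) : pvG l PySem.Set.empty = pvF l := by
  induction l with
  | nil => rfl
  | cons x r ih =>
    simp only [pvG, pvF, ih]
    simp [PySem.Set.empty]
    ring

-- ===== VERDICT (by name: the statement is the Claim_ definition above) =====
theorem arca_spec : Claim_equal_arca := by
  intro animais _
  unfold Spec_arca arca arca_alt
  have hA := arca_aux animais animais [] 0 (by simp)
  simp only [List.length_nil, Nat.cast_zero, zero_add] at hA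
  rw [hA]
  rw [arca_alt_aux animais PySem.Set.empty 0, pvG_empty]
  ring
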